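-- pv_equiv track=rewrite | github.com/kamerlinlab/KIN | src/kin/msa_indexing.py | clean_up_sequence
-- ===== SOURCE A (Python) =====
-- def clean_up_sequence(
--     seq_dict: dict, target_protein: str
-- ) -> tuple[list[str], list[str]]:
--     """Function takes in a dictionary of sequences, pickes out one that match a target protein
--     and cleans it according to the notation used in the contacts"""
--     raw_msa_sequence = seq_dict.get(target_protein)
--     residue_map = {
--         "A": "ALA",
--         "R": "ARG",
--         "D": "ASP",
--         "N": "ASN",
--         "C": "CYS",
--         "E": "GLU",
--         "Q": "GLN",
--         "G": "GLY",
--         "H": "HIS",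
--         "I": "ILE",
--         "L": "LEU",
--         "K": "LYS",
--         "M": "MET",
--         "F": "PHE",
--         "P": "PRO",
--         "S": "SER",
--         "T": "THR",
--         "W": "TRP",
--         "Y": "TYR",
--         "V": "VAL",
--         "-": "-",
--     }
--     raw_msa_sequence = raw_msa_sequence.replace("*", "")
--     short_sequence = raw_msa_sequence.replace("-", "")
--
--     short_sequence_list = list(short_sequence)
--     sequence_list = list(raw_msa_sequence)
--     sequence = [residue_map[res] for res in sequence_list]
--     short_sequence = [residue_map[res] for res in short_sequence_list]
--
--     return sequence, short_sequence
-- ===== SOURCE B (Python) =====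
-- def clean_up_sequence(
--     seq_dict: dict, target_protein: str
-- ) -> tuple[list[str], list[str]]:
--     """Single pass over the raw sequence with two accumulators: skip '*'
--     inline, look each code up by its position in a parallel code string
--     (no dict, no replace passes), and append to both lists as we go."""
--     codes = "ARDNCEQGHILKMFPSTWYV-"
--     names = ["ALA", "ARG", "ASP", "ASN", "CYS", "GLU", "GLN", "GLY", "HIS",
--              "ILE", "LEU", "LYS", "MET", "PHE", "PRO", "SER", "THR", "TRP",
--              "TYR", "VAL", "-"]
--     raw = seq_dict.get(target_protein)
--     sequence = []
--     short_sequence = []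
--     for ch in raw:
--         if ch == "*":
--             continue
--         name = names[codes.index(ch)]
--         sequence.append(name)
--         if ch != "-":
--             short_sequence.append(name)
--     return sequence, short_sequence
-- ===== Notes on version B (the rewrite author's own statement) =====
-- stated objective: alternative
-- what changed: B replaces A's replace/replace/map/map staged pipeline over a residue dict by a single loop over the raw string with two accumulators, skipping '*' inline and resolving each residue by its index in a parallel code string instead of a dict lookup.
import Mathlib
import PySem

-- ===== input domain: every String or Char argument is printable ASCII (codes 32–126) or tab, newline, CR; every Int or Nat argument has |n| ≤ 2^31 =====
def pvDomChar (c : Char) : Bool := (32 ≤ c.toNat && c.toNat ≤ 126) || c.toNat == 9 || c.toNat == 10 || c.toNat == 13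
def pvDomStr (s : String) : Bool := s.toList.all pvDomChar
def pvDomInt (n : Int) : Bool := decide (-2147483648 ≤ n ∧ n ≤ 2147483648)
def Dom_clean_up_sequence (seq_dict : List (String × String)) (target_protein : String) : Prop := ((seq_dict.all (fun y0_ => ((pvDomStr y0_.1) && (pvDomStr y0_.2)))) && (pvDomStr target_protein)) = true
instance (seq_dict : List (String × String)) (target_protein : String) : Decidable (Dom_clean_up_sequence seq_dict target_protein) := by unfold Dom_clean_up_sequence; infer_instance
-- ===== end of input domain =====

-- B replaces A's replace/replace + two dict-mapping passes by ONE loop over the raw string with two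
-- accumulators, skipping '*' inline and resolving residues via an index into a parallel code string;
-- equivalence proved on Pre_ (target key present, sequence chars in the residue alphabet).


-- ===== PORT A =====
-- A's residue_map dict literal
def residueMap : PySem.Dict Char String :=
  PySem.Dict.mk
  [('A',"ALA"),('R',"ARG"),('D',"ASP"),('N',"ASN"),('C',"CYS"),('E',"GLU"),('Q',"GLN"),
   ('G',"GLY"),('H',"HIS"),('I',"ILE"),('L',"LEU"),('K',"LYS"),('M',"MET"),('F',"PHE"),
   ('P',"PRO"),('S',"SER"),('T',"THR"),('W',"TRP"),('Y',"TYR"),('V',"VAL"),('-',"-")]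

-- residue_map[res]; KeyError (get? = none) is excluded by Pre_, so "" is never returned inside Pre_
def residueGet (c : Char) : String := (PySem.Dict.get? residueMap c).getD ""

def clean_up_sequence (seq_dict : List (String × String)) (target_protein : String) : List String × List String :=
  -- seq_dict.get(target): None (→ AttributeError on .replace) is excluded by Pre_
  let raw0 := ((PySem.Dict.mk seq_dict).get? target_protein).getD ""
  let raw_msa_sequence := PySem.Str.replace raw0 "*" ""
  let short_str := PySem.Str.replace raw_msa_sequence "-" ""
  let sequence := raw_msa_sequence.toList.map residueGet
  let short_sequence := short_str.toList.map residueGet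
  (sequence, short_sequence)

-- ===== PORT B =====
-- B's parallel tables: codes string and names list (same order)
def codesB : List Char := "ARDNCEQGHILKMFPSTWYV-".toList
def namesB : List String :=
  ["ALA","ARG","ASP","ASN","CYS","GLU","GLN","GLY","HIS","ILE","LEU",
   "LYS","MET","PHE","PRO","SER","THR","TRP","TYR","VAL","-"]

-- names[codes.index(ch)]; ValueError/IndexError (none) are excluded by Pre_, so "" never escapes inside Pre_
def nameOf (c : Char) : String :=
  (((PySem.List.index? codesB c).map (fun i => namesB[i]?)).join).getD ""

-- the loop body: skip '*', append the name to sequence, and to short_sequence unless it is a gap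
def stepB (acc : List String × List String) (ch : Char) : List String × List String :=
  if ch = '*' then acc
  else
    let name := nameOf ch
    (acc.1 ++ [name], if ch ≠ '-' then acc.2 ++ [name] else acc.2)

def clean_up_sequence_alt (seq_dict : List (String × String)) (target_protein : String) : List String × List String :=
  let raw := ((PySem.Dict.mk seq_dict).get? target_protein).getD ""
  raw.toList.foldl stepB ([], [])

-- ===== PRECONDITION & SPEC =====
-- the residue alphabet: the 20 amino-acid letters, the gap '-', and '*' (skipped before mapping)
def allowedChars : List Char :=
  ['A','R','D','N','C','E','Q','G','H','I','L','K','M','F','P','S','T','W','Y','V','-','*']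

-- Pre_ excludes exactly the inputs where A raises: a missing target key (AttributeError on
-- None.replace) and sequence characters outside the residue alphabet plus '*' (KeyError).
def Pre_clean_up_sequence (seq_dict : List (String × String)) (target_protein : String) : Prop :=
  ((PySem.Dict.mk seq_dict).get? target_protein).isSome = true ∧
  ((((PySem.Dict.mk seq_dict).get? target_protein).getD "").toList.all
    (fun c => decide (c ∈ allowedChars))) = true
instance (seq_dict : List (String × String)) (target_protein : String) : Decidable (Pre_clean_up_sequence seq_dict target_protein) := by unfold Pre_clean_up_sequence; infer_instance

def pvWitness_clean_up_sequence : (List (String × String)) × String := ([("P1", "AR-*G")], "P1")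

def Spec_clean_up_sequence (seq_dict : List (String × String)) (target_protein : String) (out : List String × List String) : Prop := out = clean_up_sequence_alt seq_dict target_protein
instance (seq_dict : List (String × String)) (target_protein : String) (out : List String × List String) : Decidable (Spec_clean_up_sequence seq_dict target_protein out) := by unfold Spec_clean_up_sequence; infer_instance

-- ===== CLAIM (what is proved, stated in full; the proofs are below) =====
def Claim_equal_clean_up_sequence : Prop := ∀ (seq_dict : List (String × String)) (target_protein : String), Dom_clean_up_sequence seq_dict target_protein → Pre_clean_up_sequence seq_dict target_protein → Spec_clean_up_sequence seq_dict target_protein (clean_up_sequence seq_dict target_protein)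

-- ===== LEMMAS AND PROOFS =====

-- s.replace(ch, "") removes every occurrence of the single character ch
lemma replace_go_single (ch : Char) : ∀ (fuel : Nat) (l acc : List Char), l.length ≤ fuel →
    PySem.Chars.replace.go [ch] [] fuel l acc = acc.reverse ++ l.filter (· ≠ ch) := by
  intro fuel
  induction fuel with
  | zero =>
    intro l acc h
    have : l = [] := List.eq_nil_of_length_eq_zero (Nat.le_zero.mp h)
    subst this; simp [PySem.Chars.replace.go]
  | succ n ih =>
    intro l acc h
    cases l with
    | nil => simp [PySem.Chars.replace.go]
    | cons c t =>
      by_cases hc : c = ch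
      · subst hc
        have hp : List.isPrefixOf [c] (c :: t) = true := by simp [List.isPrefixOf]
        simp only [PySem.Chars.replace.go, hp, if_pos, List.length_cons, List.length_nil,
          Nat.zero_add, List.drop_succ_cons, List.drop_zero, List.reverse_nil, List.nil_append]
        rw [ih t acc (by simpa using Nat.le_of_succ_le_succ h)]
        simp
      · have hp : List.isPrefixOf [ch] (c :: t) = false := by
          simp [List.isPrefixOf]; exact fun e => (hc e.symm).elim
        simp only [PySem.Chars.replace.go, hp, Bool.false_eq_true, if_neg, not_false_iff]
        rw [ih t (c :: acc) (by simpa using Nat.le_of_succ_le_succ h)]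
        simp [hc]

lemma replace_single_empty (l : List Char) (ch : Char) :
    PySem.Chars.replace l [ch] [] = l.filter (· ≠ ch) := by
  unfold PySem.Chars.replace
  simp only [List.isEmpty_cons, Bool.false_eq_true, if_neg, not_false_iff]
  simpa using replace_go_single ch l.length l [] (le_refl _)

-- on the residue alphabet, B's parallel-table lookup agrees with A's dict lookup
lemma nameOf_eq_residueGet (c : Char) (hc : c ∈ allowedChars) :
    nameOf c = residueGet c := by
  fin_cases hc <;> decide

-- what B's fold computes: the non-'*' chars mapped, and additionally gap-filtered for the short list
lemma foldl_stepB (l : List Char) : ∀ (s sh : List String),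
    l.foldl stepB (s, sh) =
      (s ++ (l.filter (· ≠ '*')).map nameOf,
       sh ++ (((l.filter (· ≠ '*')).filter (· ≠ '-')).map nameOf)) := by
  induction l with
  | nil => intro s sh; simp
  | cons c t ih =>
    intro s sh
    by_cases hc : c = '*'
    · subst hc
      simp only [List.foldl_cons, stepB, if_true]
      rw [ih s sh]; simp
    · by_cases hg : c = '-'
      · subst hg
        simp only [List.foldl_cons, stepB]
        norm_num
        rw [ih]
        simp
      · simp only [List.foldl_cons, stepB, if_neg hc, if_pos hg]
        rw [ih]
        simp [hc, hg]

-- ===== VERDICT (by name: the statement is the Claim_ definition above) =====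
theorem clean_up_sequence_spec : Claim_equal_clean_up_sequence := by
  intro seq_dict target_protein _ hpre
  obtain ⟨_, hall⟩ := hpre
  unfold Spec_clean_up_sequence clean_up_sequence clean_up_sequence_alt
  rw [foldl_stepB]
  simp only [List.nil_append, PySem.Str.toList_replace]
  have h1 : ("*" : String).toList = ['*'] := rfl
  have h2 : ("-" : String).toList = ['-'] := rfl
  have h3 : ("" : String).toList = [] := rfl
  rw [h1, h2, h3, replace_single_empty, replace_single_empty]
  have hmem : ∀ c ∈ (((PySem.Dict.mk seq_dict).get? target_protein).getD "").toList,
      c ∈ allowedChars := fun c hc =>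
    of_decide_eq_true (List.all_eq_true.mp hall c hc)
  refine Prod.ext ?_ ?_
  · exact (List.map_congr_left fun c hc =>
      (nameOf_eq_residueGet c (hmem c (List.mem_of_mem_filter hc)))).symm
  · exact (List.map_congr_left fun c hc =>
      (nameOf_eq_residueGet c
        (hmem c (List.mem_of_mem_filter (List.mem_of_mem_filter hc))))).symm
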